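-- pv_equiv track=rewrite | github.com/Siyan-Dimitrov/story-teller | backend/main.py | _find_paragraph_near
-- ===== SOURCE A (Python) =====
-- def _find_paragraph_near(text: str, target_pos: int, search_range: int) -> int:
--     """Find the nearest paragraph break (\\n\\n) to target_pos within search_range.
--     Returns the position after the break, or -1 if none found."""
--     text_len = len(text)
--     best_para = -1
--     best_dist = float('inf')
--     for pos in range(max(0, target_pos - search_range), min(text_len - 1, target_pos + search_range)):
--         if text[pos:pos+2] == "\n\n":
--             dist = abs(pos - target_pos)
--             if dist < best_dist:
--                 best_dist = dist
--                 best_para = pos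
--     return best_para + 2 if best_para != -1 else -1
-- ===== SOURCE B (Python) =====
-- def _find_paragraph_near(text: str, target_pos: int, search_range: int) -> int:
--     """Find the nearest paragraph break (\n\n) to target_pos within search_range.
--     Returns the position after the break, or -1 if none found."""
--     lo = max(0, target_pos - search_range)
--     hi = min(len(text) - 1, target_pos + search_range)
--     if hi <= lo:
--         return -1
--     left = text.rfind("\n\n", lo, min(hi - 1, target_pos) + 2) if target_pos >= lo else -1
--     right = text.find("\n\n", max(lo, target_pos), hi + 1)
--     if left == -1 and right == -1:
--         return -1
--     if left == -1:
--         return right + 2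
--     if right == -1:
--         return left + 2
--     return (left if target_pos - left <= right - target_pos else right) + 2
-- ===== Notes on version B (the rewrite author's own statement) =====
-- stated objective: faster
-- what changed: Replaced A's explicit per-position scan over the whole window (slicing text[pos:pos+2] and tracking best position/distance) by two built-in substring searches - str.rfind for the nearest break at or before the target and str.find for the nearest at or after it - followed by a single closest-candidate comparison that breaks ties toward the lower position.
import Mathlib
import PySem

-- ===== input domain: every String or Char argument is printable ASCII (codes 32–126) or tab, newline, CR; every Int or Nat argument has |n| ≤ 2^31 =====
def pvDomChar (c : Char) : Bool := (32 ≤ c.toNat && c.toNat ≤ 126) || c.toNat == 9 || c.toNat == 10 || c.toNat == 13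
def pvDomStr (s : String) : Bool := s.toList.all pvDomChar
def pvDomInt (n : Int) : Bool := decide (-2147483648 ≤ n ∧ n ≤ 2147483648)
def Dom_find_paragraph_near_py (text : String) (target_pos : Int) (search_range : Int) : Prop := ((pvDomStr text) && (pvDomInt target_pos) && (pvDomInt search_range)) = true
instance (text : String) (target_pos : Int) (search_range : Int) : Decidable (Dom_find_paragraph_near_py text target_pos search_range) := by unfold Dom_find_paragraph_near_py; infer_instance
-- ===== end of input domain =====

-- B replaces A's per-position scan-and-track loop by two built-in searches (rfind left of the
-- target, find right of it) and one comparison; same O(window) asymptotics, measurably faster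
-- by a constant factor (C-level scans instead of per-position Python slicing).

-- ===== PORT A =====
-- loop body of A's 'for pos in range(...)': best state is (best_para, best_dist),
-- best_dist = none encodes float('inf')
def pvLoopA (text : String) (target_pos : Int) (st : Int × Option Int) (pos : Int) :
    Int × Option Int :=
  if PySem.Str.slice text (some pos) (some (pos + 2)) = "\n\n" then
    if (match st.2 with
        | none => true
        | some d => decide (|pos - target_pos| < d)) then
      (pos, some |pos - target_pos|)
    else st
  else st

def find_paragraph_near_py (text : String) (target_pos : Int) (search_range : Int) : Int :=
  let text_len : Int := PySem.Str.len text
  let st :=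
    (PySem.List.pyRange (max 0 (target_pos - search_range))
        (min (text_len - 1) (target_pos + search_range)) 1).foldl
      (pvLoopA text target_pos) (-1, none)
  if st.1 ≠ -1 then st.1 + 2 else -1

-- ===== PORT B =====
def find_paragraph_near_py_alt (text : String) (target_pos : Int) (search_range : Int) : Int :=
  let lo := max 0 (target_pos - search_range)
  let hi := min (PySem.Str.len text - 1) (target_pos + search_range)
  if hi ≤ lo then -1
  else
    let left := if target_pos ≥ lo then
        PySem.Str.rfindFrom text "\n\n" lo (some (min (hi - 1) target_pos + 2))
      else -1
    let right := PySem.Str.findFrom text "\n\n" (max lo target_pos) (some (hi + 1))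
    if left = -1 ∧ right = -1 then -1
    else if left = -1 then right + 2
    else if right = -1 then left + 2
    else (if target_pos - left ≤ right - target_pos then left else right) + 2

-- ===== PRECONDITION & SPEC =====
def Spec_find_paragraph_near_py (text : String) (target_pos : Int) (search_range : Int) (out : Int) : Prop := out = find_paragraph_near_py_alt text target_pos search_range
instance (text : String) (target_pos : Int) (search_range : Int) (out : Int) : Decidable (Spec_find_paragraph_near_py text target_pos search_range out) := by unfold Spec_find_paragraph_near_py; infer_instance

-- ===== CLAIM (what is proved, stated in full; the proofs are below) =====
def Claim_equal_find_paragraph_near_py : Prop := ∀ (text : String) (target_pos : Int) (search_range : Int), Dom_find_paragraph_near_py text target_pos search_range → Spec_find_paragraph_near_py text target_pos search_range (find_paragraph_near_py text target_pos search_range)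

-- ===== LEMMAS AND PROOFS =====

-- "text[pos:pos+2] == '\n\n'" is "['\n','\n'] is a prefix of the characters from pos on"
lemma pvChk_iff (text : String) (p : Int) (hp : 0 ≤ p) :
    (PySem.Str.slice text (some p) (some (p + 2)) = "\n\n") ↔
      ['\n', '\n'] <+: text.toList.drop p.toNat := by
  rw [← String.toList_inj, PySem.Str.toList_slice]
  have h1 : p = ((p.toNat : Nat) : Int) := by omega
  rw [h1]
  have h2 : ((p.toNat : Nat) : Int) + 2 = ((p.toNat + 2 : Nat) : Int) := by omega
  rw [h2]
  simp only [PySem.Chars.slice_eq_listSlice, PySem.List.slice_natCast, Int.toNat_natCast]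
  have h3 : p.toNat + 2 - p.toNat = 2 := by omega
  rw [h3]
  have h4 : ("\n\n").toList = ['\n', '\n'] := by decide
  rw [h4]
  constructor
  · intro h; rw [← h]; exact List.take_prefix _ _
  · intro h; exact (List.prefix_iff_eq_take.mp (by simpa using h)).symm

-- spec of PySem.Chars.rfind.go: highest j ≤ k where sub is a prefix of l.drop j, else -1
lemma pvRfindGo_spec (l sub : List Char) (k : Nat) :
    (PySem.Chars.rfind.go l sub k = -1 ∧ ∀ j : Nat, j ≤ k → ¬ sub <+: l.drop j) ∨
      (∃ j : Nat, j ≤ k ∧ PySem.Chars.rfind.go l sub k = (j : Int) ∧ sub <+: l.drop j ∧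
        ∀ i : Nat, j < i → i ≤ k → ¬ sub <+: l.drop i) := by
  induction k with
  | zero =>
    have he : PySem.Chars.rfind.go l sub 0 = if sub.isPrefixOf l then 0 else -1 := rfl
    by_cases h : sub <+: l
    · right; exact ⟨0, le_refl _, by simp [he, List.isPrefixOf_iff_prefix, h], by simpa using h, by omega⟩
    · left
      refine ⟨by simp [he, List.isPrefixOf_iff_prefix, h], ?_⟩
      intro j hj; interval_cases j; simpa using h
  | succ j ih =>
    have he : PySem.Chars.rfind.go l sub (j+1) =
        if sub.isPrefixOf (l.drop (j+1)) then ((j:Int)+1) else PySem.Chars.rfind.go l sub j := by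
      simp [PySem.Chars.rfind.go]
    by_cases h : sub <+: l.drop (j+1)
    · right
      refine ⟨j+1, le_refl _, ?_, h, by omega⟩
      rw [he]; simp [List.isPrefixOf_iff_prefix, h]
    · have he' : PySem.Chars.rfind.go l sub (j+1) = PySem.Chars.rfind.go l sub j := by
        rw [he]; simp [List.isPrefixOf_iff_prefix, h]
      rcases ih with ⟨h1, h2⟩ | ⟨j', hj', h1, h2, h3⟩
      · left
        refine ⟨he' ▸ h1, fun i hi => ?_⟩
        rcases Nat.lt_or_ge i (j+1) with hlt | hge
        · exact h2 i (by omega)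
        · have : i = j + 1 := by omega
          exact this ▸ h
      · right
        refine ⟨j', by omega, he' ▸ h1, h2, fun i hi1 hi2 => ?_⟩
        rcases Nat.lt_or_ge i (j+1) with hlt | hge
        · exact h3 i hi1 (by omega)
        · have : i = j + 1 := by omega
          exact this ▸ h

-- spec of PySem.Chars.find.go (sub ≠ []): k + (least j where sub is a prefix of l.drop j), else -1
lemma pvFindGo_spec (sub : List Char) (hsub : sub ≠ []) : ∀ (l : List Char) (k : Nat),
    (PySem.Chars.find.go sub l k = -1 ∧ ∀ j : Nat, ¬ sub <+: l.drop j) ∨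
      (∃ j : Nat, PySem.Chars.find.go sub l k = (k : Int) + (j : Int) ∧ sub <+: l.drop j ∧
        ∀ i : Nat, i < j → ¬ sub <+: l.drop i) := by
  intro l
  induction l with
  | nil =>
    intro k
    left
    have he : PySem.Chars.find.go sub [] k = if sub.isEmpty then (k:Int) else -1 := rfl
    constructor
    · rw [he]; simp [List.isEmpty_iff, hsub]
    · intro j
      simp only [List.drop_nil]
      intro h
      exact hsub (List.prefix_nil.mp h)
  | cons c t ih =>
    intro k
    have he : PySem.Chars.find.go sub (c::t) k =
        if sub.isPrefixOf (c::t) then (k:Int) else PySem.Chars.find.go sub t (k+1) := rfl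
    by_cases h : sub <+: (c::t)
    · right
      exact ⟨0, by rw [he]; simp [List.isPrefixOf_iff_prefix, h], by simpa using h, by omega⟩
    · have he' : PySem.Chars.find.go sub (c::t) k = PySem.Chars.find.go sub t (k+1) := by
        rw [he]; simp [List.isPrefixOf_iff_prefix, h]
      rcases ih (k+1) with ⟨h1, h2⟩ | ⟨j, h1, h2, h3⟩
      · left
        refine ⟨he' ▸ h1, fun j => ?_⟩
        cases j with
        | zero => simpa using h
        | succ m => simpa using h2 m
      · right
        refine ⟨j + 1, ?_, by simpa using h2, fun i hi => ?_⟩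
        · rw [he', h1]; push_cast; ring
        · cases i with
          | zero => simpa using h
          | succ m => simpa using h3 m (by omega)

-- a match inside the slice text[S:E] is a match in text with room up to E
lemma pvPrefix_slice (cs sub : List Char) (S E j : Nat) (hlen : sub.length = 2) :
    sub <+: ((cs.take E).drop S).drop j ↔ sub <+: cs.drop (S + j) ∧ S + j + 2 ≤ E := by
  rw [List.drop_drop, List.drop_take]
  rw [List.prefix_take_iff, hlen]
  constructor
  · rintro ⟨h1, h2⟩
    exact ⟨by rwa [Nat.add_comm S j] at h1 ⊢, by omega⟩
  · rintro ⟨h1, h2⟩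
    exact ⟨by rwa [Nat.add_comm S j] at h1 ⊢, by omega⟩

-- characterization of B's left candidate: text.rfind("\n\n", lo, m + 2)
lemma pvLeft_spec (text : String) (lo m : Int) (hlo : 0 ≤ lo) (hm : lo ≤ m)
    (hmn : m + 2 ≤ (text.toList.length : Int)) :
    (PySem.Str.rfindFrom text "\n\n" lo (some (m + 2)) = -1 ∧
        ∀ p : Int, lo ≤ p → p ≤ m → ¬ ['\n', '\n'] <+: text.toList.drop p.toNat) ∨
      (lo ≤ PySem.Str.rfindFrom text "\n\n" lo (some (m + 2)) ∧
        PySem.Str.rfindFrom text "\n\n" lo (some (m + 2)) ≤ m ∧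
        ['\n', '\n'] <+: text.toList.drop (PySem.Str.rfindFrom text "\n\n" lo (some (m + 2))).toNat ∧
        ∀ q : Int, PySem.Str.rfindFrom text "\n\n" lo (some (m + 2)) < q → q ≤ m →
          ¬ ['\n', '\n'] <+: text.toList.drop q.toNat) := by
  have hsub : ("\n\n").toList = ['\n', '\n'] := by decide
  set cs := text.toList with hcs
  have hE : ¬ ((cs.length : Int) < m + 2) := by omega
  have hst : ¬ (lo < 0) := by omega
  have he_lt : ¬ (m + 2 < lo) := by omega
  have hun : PySem.Str.rfindFrom text "\n\n" lo (some (m + 2)) =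
      (if PySem.Chars.rfind ((cs.take (m+2).toNat).drop lo.toNat) ['\n','\n'] = -1 then -1
       else lo + PySem.Chars.rfind ((cs.take (m+2).toNat).drop lo.toNat) ['\n','\n']) := by
    rw [PySem.Str.rfindFrom_eq, hsub]
    simp only [PySem.Chars.rfindFrom]
    rw [if_neg hE, if_neg (by omega : ¬ (m + 2 < 0)), if_neg hst, if_neg he_lt]
  have hrg : ∀ (SL : List Char), PySem.Chars.rfind SL ['\n','\n'] = PySem.Chars.rfind.go SL ['\n','\n'] SL.length := fun _ => rfl
  set SL := (cs.take (m+2).toNat).drop lo.toNat with hSL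
  -- any prefix match inside SL is within its length
  have hjk : ∀ j : Nat, ['\n','\n'] <+: SL.drop j → j ≤ SL.length := by
    intro j hj
    by_contra hc
    rw [List.drop_eq_nil_of_le (by omega)] at hj
    simpa using List.prefix_nil.mp hj
  have hbr : ∀ j : Nat, ['\n','\n'] <+: SL.drop j ↔
      ['\n','\n'] <+: cs.drop (lo.toNat + j) ∧ lo.toNat + j + 2 ≤ (m+2).toNat := by
    intro j
    exact pvPrefix_slice cs ['\n','\n'] lo.toNat (m+2).toNat j (by decide)
  rcases pvRfindGo_spec SL ['\n','\n'] SL.length with ⟨h1, h2⟩ | ⟨j, hj, h1, h2, h3⟩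
  · left
    rw [hun, hrg, h1]
    refine ⟨by simp, ?_⟩
    intro p hp1 hp2 hp3
    have hj : ['\n','\n'] <+: SL.drop (p.toNat - lo.toNat) := by
      rw [hbr]
      constructor
      · have : lo.toNat + (p.toNat - lo.toNat) = p.toNat := by omega
        rw [this]; exact hp3
      · omega
    exact h2 _ (hjk _ hj) hj
  · right
    rw [hbr] at h2
    have hL : PySem.Str.rfindFrom text "\n\n" lo (some (m + 2)) = lo + (j : Int) := by
      rw [hun, hrg, h1]
      rw [if_neg (by omega : ¬ ((j : Int) = -1))]
    rw [hL]
    refine ⟨by omega, by omega, ?_, ?_⟩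
    · have : (lo + (j:Int)).toNat = lo.toNat + j := by omega
      rw [this]; exact h2.1
    · intro q hq1 hq2 hq3
      have hi : ['\n','\n'] <+: SL.drop (q.toNat - lo.toNat) := by
        rw [hbr]
        constructor
        · have : lo.toNat + (q.toNat - lo.toNat) = q.toNat := by omega
          rw [this]; exact hq3
        · omega
      exact h3 _ (by omega) (hjk _ hi) hi

-- characterization of B's right candidate: text.find("\n\n", s, e)
lemma pvRight_spec (text : String) (s e : Int) (hs : 0 ≤ s) (he0 : 0 ≤ e)
    (he : e ≤ (text.toList.length : Int)) :
    (PySem.Str.findFrom text "\n\n" s (some e) = -1 ∧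
        ∀ p : Int, s ≤ p → p ≤ e - 2 → ¬ ['\n', '\n'] <+: text.toList.drop p.toNat) ∨
      (s ≤ PySem.Str.findFrom text "\n\n" s (some e) ∧
        PySem.Str.findFrom text "\n\n" s (some e) ≤ e - 2 ∧
        ['\n', '\n'] <+: text.toList.drop (PySem.Str.findFrom text "\n\n" s (some e)).toNat ∧
        ∀ q : Int, s ≤ q → q < PySem.Str.findFrom text "\n\n" s (some e) →
          ¬ ['\n', '\n'] <+: text.toList.drop q.toNat) := by
  have hsub : ("\n\n").toList = ['\n', '\n'] := by decide
  set cs := text.toList with hcs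
  by_cases hlt : e < s
  · left
    constructor
    · rw [PySem.Str.findFrom_eq, hsub]
      simp only [PySem.Chars.findFrom]
      rw [if_neg (by omega : ¬ ((cs.length : Int) < e)), if_neg (by omega : ¬ (e < 0)),
        if_neg (by omega : ¬ (s < 0)), if_pos hlt]
    · intro p hp1 hp2; omega
  · have hun : PySem.Str.findFrom text "\n\n" s (some e) =
        (if PySem.Chars.find ((cs.take e.toNat).drop s.toNat) ['\n','\n'] = -1 then -1
         else s + PySem.Chars.find ((cs.take e.toNat).drop s.toNat) ['\n','\n']) := by
      rw [PySem.Str.findFrom_eq, hsub]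
      simp only [PySem.Chars.findFrom]
      rw [if_neg (by omega : ¬ ((cs.length : Int) < e)), if_neg (by omega : ¬ (e < 0)),
        if_neg (by omega : ¬ (s < 0)), if_neg hlt]
    set SL := (cs.take e.toNat).drop s.toNat with hSL
    have hfg : PySem.Chars.find SL ['\n','\n'] = PySem.Chars.find.go ['\n','\n'] SL 0 := rfl
    have hbr : ∀ j : Nat, ['\n','\n'] <+: SL.drop j ↔
        ['\n','\n'] <+: cs.drop (s.toNat + j) ∧ s.toNat + j + 2 ≤ e.toNat := fun j =>
      pvPrefix_slice cs ['\n','\n'] s.toNat e.toNat j (by decide)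
    rcases pvFindGo_spec ['\n','\n'] (by decide) SL 0 with ⟨h1, h2⟩ | ⟨j, h1, h2, h3⟩
    · left
      rw [hun, hfg, h1]
      refine ⟨by simp, ?_⟩
      intro p hp1 hp2 hp3
      refine h2 (p.toNat - s.toNat) ?_
      rw [hbr]
      constructor
      · have : s.toNat + (p.toNat - s.toNat) = p.toNat := by omega
        rw [this]; exact hp3
      · omega
    · right
      rw [hbr] at h2
      have hR : PySem.Str.findFrom text "\n\n" s (some e) = s + (j : Int) := by
        rw [hun, hfg, h1]
        rw [if_neg (by push_cast; omega : ¬ (((0:Nat):Int) + (j:Int) = -1))]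
        push_cast; ring
      rw [hR]
      refine ⟨by omega, by omega, ?_, ?_⟩
      · have : (s + (j:Int)).toNat = s.toNat + j := by omega
        rw [this]; exact h2.1
      · intro q hq1 hq2 hq3
        refine h3 (q.toNat - s.toNat) (by omega) ?_
        rw [hbr]
        constructor
        · have : s.toNat + (q.toNat - s.toNat) = q.toNat := by omega
          rw [this]; exact hq3
        · omega

-- A's loop over positions left of the target: distances strictly decrease, so the
-- final state holds the greatest matching position
lemma pvFoldLeft (text : String) (tp : Int) : ∀ (k : Nat) (a b : Int), 0 ≤ a →
    (b ≤ tp + 1 ∨ b ≤ a) → k = (b - a).toNat →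
    (((PySem.List.pyRange a b 1).foldl (pvLoopA text tp) (-1, none) = ((-1 : Int), (none : Option Int)) ∧
        ∀ p : Int, a ≤ p → p < b → ¬ (PySem.Str.slice text (some p) (some (p + 2)) = "\n\n")) ∨
      (∃ p : Int, (PySem.List.pyRange a b 1).foldl (pvLoopA text tp) (-1, none) = (p, some (tp - p)) ∧
        a ≤ p ∧ p < b ∧ (PySem.Str.slice text (some p) (some (p + 2)) = "\n\n") ∧
        ∀ q : Int, p < q → q < b → ¬ (PySem.Str.slice text (some q) (some (q + 2)) = "\n\n"))) := by
  intro k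
  induction k with
  | zero =>
    intro a b ha hb hk
    left
    rw [PySem.List.pyRange_one_eq_nil (by omega)]
    exact ⟨rfl, fun p hp1 hp2 => by omega⟩
  | succ n ih =>
    intro a b ha hb hk
    have hab : a < b := by omega
    have hbt : b ≤ tp + 1 := by omega
    have hsplit : PySem.List.pyRange a b 1 = PySem.List.pyRange a (b-1) 1 ++ [b-1] := by
      have h := PySem.List.pyRange_one_succ_right (a := a) (b := b-1) (by omega)
      rwa [(by ring : b - 1 + 1 = b)] at h
    rw [hsplit, List.foldl_append]
    rcases ih a (b - 1) ha (by omega) (by omega) with ⟨h1, h2⟩ | ⟨p, h1, h2, h3, h4, h5⟩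
    · rw [h1]
      by_cases hc : PySem.Str.slice text (some (b-1)) (some (b-1+2)) = "\n\n"
      · right
        refine ⟨b - 1, ?_, by omega, by omega, hc, fun q hq1 hq2 => by omega⟩
        simp only [List.foldl_cons, List.foldl_nil, pvLoopA, if_pos hc]
        have habs : |b - 1 - tp| = tp - (b - 1) := by rw [abs_of_nonpos (by omega)]; ring
        rw [habs]
        simp
      · left
        refine ⟨?_, fun p hp1 hp2 => ?_⟩
        · simp only [List.foldl_cons, List.foldl_nil, pvLoopA, if_neg hc]
        · rcases Int.lt_or_le p (b-1) with h | h
          · exact h2 p hp1 h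
          · have : p = b - 1 := by omega
            exact this ▸ hc
    · rw [h1]
      by_cases hc : PySem.Str.slice text (some (b-1)) (some (b-1+2)) = "\n\n"
      · right
        refine ⟨b - 1, ?_, by omega, by omega, hc, fun q hq1 hq2 => by omega⟩
        simp only [List.foldl_cons, List.foldl_nil, pvLoopA, if_pos hc]
        have hd : |b - 1 - tp| = tp - (b - 1) := by rw [abs_of_nonpos (by omega)]; ring
        rw [hd]
        rw [if_pos]
        simp only [decide_eq_true_eq]
        omega
      · right
        refine ⟨p, ?_, h2, by omega, h4, fun q hq1 hq2 => ?_⟩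
        · simp only [List.foldl_cons, List.foldl_nil, pvLoopA, if_neg hc]
        · rcases Int.lt_or_le q (b-1) with h | h
          · exact h5 q hq1 h
          · have : q = b - 1 := by omega
            exact this ▸ hc

-- A's loop over positions right of the target, from an arbitrary best-so-far state:
-- distances strictly increase, so the first match that beats the state wins (or nothing fires)
lemma pvFoldRight (text : String) (tp : Int) : ∀ (k : Nat) (a b : Int) (st : Int × Option Int),
    0 ≤ a → (tp ≤ a ∨ b ≤ a) → k = (b - a).toNat →
    (((PySem.List.pyRange a b 1).foldl (pvLoopA text tp) st = st ∧
        ∀ p : Int, a ≤ p → p < b → (PySem.Str.slice text (some p) (some (p + 2)) = "\n\n") →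
          ¬ (match st.2 with | none => True | some d => p - tp < d)) ∨
      (∃ F : Int, (PySem.List.pyRange a b 1).foldl (pvLoopA text tp) st = (F, some (F - tp)) ∧
        a ≤ F ∧ F < b ∧ (PySem.Str.slice text (some F) (some (F + 2)) = "\n\n") ∧
        (match st.2 with | none => True | some d => F - tp < d) ∧
        ∀ q : Int, a ≤ q → q < F → ¬ (PySem.Str.slice text (some q) (some (q + 2)) = "\n\n"))) := by
  intro k
  induction k with
  | zero =>
    intro a b st ha hb hk
    left
    rw [PySem.List.pyRange_one_eq_nil (by omega)]
    exact ⟨rfl, fun p hp1 hp2 => by omega⟩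
  | succ n ih =>
    intro a b st ha hb hk
    have hab : a < b := by omega
    have hta : tp ≤ a := by omega
    rw [PySem.List.pyRange_one_cons (by omega : a < b), List.foldl_cons]
    by_cases hc : PySem.Str.slice text (some a) (some (a + 2)) = "\n\n"
    · have habs : |a - tp| = a - tp := abs_of_nonneg (by omega)
      by_cases hlt : (match st.2 with | none => True | some d => a - tp < d)
      · -- the update fires at a
        have hstep : pvLoopA text tp st a = (a, some (a - tp)) := by
          simp only [pvLoopA, if_pos hc, habs]
          rw [if_pos]
          rcases hst2 : st.2 with _ | d
          · simp
          · simp only [hst2] at hlt ⊢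
            simpa using hlt
        rw [hstep]
        rcases ih (a+1) b (a, some (a - tp)) (by omega) (by omega) (by omega) with
          ⟨h1, h2⟩ | ⟨F, h1, h2, h3, h4, h5, h6⟩
        · right
          exact ⟨a, h1, le_refl _, by omega, hc, hlt, fun q hq1 hq2 => by omega⟩
        · exfalso
          simp only at h5
          omega
      · -- the update does not fire at a
        have hstep : pvLoopA text tp st a = st := by
          simp only [pvLoopA, if_pos hc, habs]
          rw [if_neg]
          rcases hst2 : st.2 with _ | d
          · simp only [hst2] at hlt; simp at hlt
          · simp only [hst2] at hlt ⊢
            simpa using hlt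
        obtain ⟨d, hd⟩ : ∃ d, st.2 = some d := by
          rcases hst2 : st.2 with _ | d
          · simp [hst2] at hlt
          · exact ⟨d, rfl⟩
        simp only [hd] at hlt
        rw [hstep]
        rcases ih (a+1) b st (by omega) (by omega) (by omega) with
          ⟨h1, h2⟩ | ⟨F, h1, h2, h3, h4, h5, h6⟩
        · left
          refine ⟨h1, fun p hp1 hp2 hp3 => ?_⟩
          rcases Int.lt_or_le a p with h | h
          · exact h2 p (by omega) hp2 hp3
          · have : p = a := by omega
            subst this
            simp only [hd]
            exact hlt
        · exfalso
          simp only [hd] at h5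
          omega
    · have hstep : pvLoopA text tp st a = st := by
        simp only [pvLoopA, if_neg hc]
      rw [hstep]
      rcases ih (a+1) b st (by omega) (by omega) (by omega) with
        ⟨h1, h2⟩ | ⟨F, h1, h2, h3, h4, h5, h6⟩
      · left
        refine ⟨h1, fun p hp1 hp2 hp3 => ?_⟩
        rcases Int.lt_or_le a p with h | h
        · exact h2 p (by omega) hp2 hp3
        · have : p = a := by omega
          subst this
          exact absurd hp3 hc
      · right
        refine ⟨F, h1, by omega, h3, h4, h5, fun q hq1 hq2 => ?_⟩
        rcases Int.lt_or_le a q with h | h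
        · exact h6 q (by omega) hq2
        · have : q = a := by omega
          exact this ▸ hc

-- ===== VERDICT (by name: the statement is the Claim_ definition above) =====
theorem find_paragraph_near_py_spec : Claim_equal_find_paragraph_near_py := by
  intro text tp sr _
  unfold Spec_find_paragraph_near_py find_paragraph_near_py find_paragraph_near_py_alt
  simp only [PySem.Str.len_eq]
  set cs := text.toList with hcs
  set n : Int := (cs.length : Int) with hn
  set lo := max 0 (tp - sr) with hlo
  set hi := min (n - 1) (tp + sr) with hhi
  have h0lo : 0 ≤ lo := by omega
  by_cases hA : hi ≤ lo
  · rw [if_pos hA, PySem.List.pyRange_one_eq_nil (by omega : hi ≤ lo)]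
    simp
  · rw [if_neg hA]
    have hnlen : ((text.toList.length : Int)) = n := rfl
    have hlohi : lo < hi := by omega
    have hhin : hi ≤ n - 1 := by omega
    set M := min (hi - 1) tp with hM
    set mid := max lo (min (tp + 1) hi) with hmid
    have hlomid : lo ≤ mid := by omega
    have hmidhi : mid ≤ hi := by omega
    have hiff : ∀ p : Int, lo ≤ p → (p < mid ↔ p ≤ M) := by intro p hp; omega
    have hmidor : tp ≤ mid ∨ hi ≤ mid := by omega
    set s := max lo tp with hs
    set stA := (PySem.List.pyRange lo hi 1).foldl (pvLoopA text tp) ((-1 : Int), (none : Option Int)) with hstA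
    set stL := (PySem.List.pyRange lo mid 1).foldl (pvLoopA text tp) ((-1 : Int), (none : Option Int)) with hstL
    have hsplitA : stA = (PySem.List.pyRange mid hi 1).foldl (pvLoopA text tp) stL := by
      rw [hstA, hstL, ← List.foldl_append, ← PySem.List.pyRange_one_append lo mid hi hlomid hmidhi]
    set Lv := (if tp ≥ lo then PySem.Str.rfindFrom text "\n\n" lo (some (min (hi - 1) tp + 2)) else (-1 : Int)) with hLv
    set Rv := PySem.Str.findFrom text "\n\n" s (some (hi + 1)) with hRv
    -- unified characterization of the left side: B's left candidate and A's left-half fold agree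
    have hL : (stL = (-1, none) ∧ Lv = -1 ∧ ∀ p : Int, lo ≤ p → p ≤ M → ¬ ['\n','\n'] <+: cs.drop p.toNat) ∨
        (stL = (Lv, some (tp - Lv)) ∧ lo ≤ Lv ∧ Lv ≤ M ∧ ['\n','\n'] <+: cs.drop Lv.toNat ∧
          ∀ q : Int, Lv < q → q ≤ M → ¬ ['\n','\n'] <+: cs.drop q.toNat) := by
      have hfl := pvFoldLeft text tp (mid - lo).toNat lo mid h0lo (by omega) rfl
      by_cases htp : tp ≥ lo
      · rw [hLv, if_pos htp]
        have hls := pvLeft_spec text lo (min (hi - 1) tp) h0lo (by omega) (by omega)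
        rcases hls with ⟨he1, he2⟩ | ⟨hf1, hf2, hf3, hf4⟩
        · -- no break in the left window
          rcases hfl with ⟨hg1, hg2⟩ | ⟨p, hg1, hg2, hg3, hg4, hg5⟩
          · exact Or.inl ⟨hg1, he1, he2⟩
          · exact absurd ((pvChk_iff text p (by omega)).mp hg4) (he2 p hg2 (by omega))
        · -- a break exists; the fold must have found exactly it
          rcases hfl with ⟨hg1, hg2⟩ | ⟨p, hg1, hg2, hg3, hg4, hg5⟩
          · exact absurd ((pvChk_iff text _ (by omega)).mpr hf3) (hg2 _ hf1 (by omega))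
          · have hpL : p = PySem.Str.rfindFrom text "\n\n" lo (some (min (hi - 1) tp + 2)) := by
              by_contra hne
              rcases Int.lt_or_le p (PySem.Str.rfindFrom text "\n\n" lo (some (min (hi - 1) tp + 2))) with hlt | hge
              · exact absurd ((pvChk_iff text _ (by omega)).mpr hf3) (hg5 _ hlt ((hiff _ hf1).mpr hf2))
              · exact absurd ((pvChk_iff text p (by omega)).mp hg4) (hf4 p (by omega) (by omega))
            right
            rw [← hpL]
            exact ⟨hg1, hg2, (hiff _ hg2).mp hg3, (pvChk_iff text p (by omega)).mp hg4,
              fun q hq1 hq2 => fun hb => hg5 q hq1 ((hiff _ (by omega)).mpr hq2) ((pvChk_iff text q (by omega)).mpr hb)⟩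
      · -- target left of the window: left region is empty
        have hmlo : mid = lo := by omega
        left
        rcases hfl with ⟨hg1, hg2⟩ | ⟨p, hg1, hg2, hg3, hg4, hg5⟩
        · exact ⟨hg1, by rw [hLv, if_neg htp], fun p hp1 hp2 => by omega⟩
        · omega
    -- characterization of B's right candidate
    have hR := pvRight_spec text s (hi + 1) (by omega) (by omega) (by omega)
    have he2 : hi + 1 - 2 = hi - 1 := by ring
    rw [he2, ← hRv] at hR
    -- fold over the right half
    have hfr := pvFoldRight text tp (hi - mid).toNat mid hi stL (by omega) hmidor rfl
    rw [← hsplitA] at hfr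
    rcases hL with ⟨hl1, hl2, hl3⟩ | ⟨hl1, hl2, hl3, hl4, hl5⟩
    · -- no left candidate: stL = (-1, none)
      rw [hl1] at hfr
      rcases hR with ⟨hr1, hr2⟩ | ⟨hr1, hr2, hr3, hr4⟩
      · -- no right candidate either: nothing fires, A returns -1
        have hsA : stA = (-1, none) := by
          rcases hfr with ⟨hg1, _⟩ | ⟨F, hg1, hg2, hg3, hg4, _, _⟩
          · exact hg1
          · exfalso
            have hbF := (pvChk_iff text F (by omega)).mp hg4
            rcases Int.lt_or_le F mid with h | h
            · omega
            · exact hr2 F (by omega) (by omega) hbF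
        rw [hsA, hl2, hr1]
        norm_num
      · -- right candidate Rv exists, left none: A must end at Rv
        have hRmid : mid ≤ Rv := by
          by_contra hc
          exact hl3 Rv (by omega) (by omega) hr3
        have hsA : stA = (Rv, some (Rv - tp)) := by
          rcases hfr with ⟨hg1, hg2⟩ | ⟨F, hg1, hg2, hg3, hg4, hg5, hg6⟩
          · exact absurd trivial (hg2 Rv hRmid (by omega) ((pvChk_iff text Rv (by omega)).mpr hr3))
          · have hFR : F = Rv := by
              by_contra hne
              rcases Int.lt_or_le F Rv with hlt | hge
              · exact hr4 F (by omega) hlt ((pvChk_iff text F (by omega)).mp hg4)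
              · exact hg6 Rv hRmid (by omega) ((pvChk_iff text Rv (by omega)).mpr hr3)
            rw [hFR] at hg1
            exact hg1
        rw [hsA, hl2]
        rw [if_neg (by rintro ⟨h1, h2⟩; omega : ¬ ((-1 : Int) = -1 ∧ Rv = -1))]
        rw [if_pos rfl]
        rw [if_pos (by omega : Rv ≠ -1)]
    · -- left candidate Lv exists: stL = (Lv, some (tp - Lv))
      rw [hl1] at hfr
      have hLv0 : 0 ≤ Lv := by omega
      have hLtp : Lv ≤ tp := by omega
      rcases hR with ⟨hr1, hr2⟩ | ⟨hr1, hr2, hr3, hr4⟩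
      · -- no right candidate: nothing fires on the right, A returns Lv + 2
        have hsA : stA = (Lv, some (tp - Lv)) := by
          rcases hfr with ⟨hg1, _⟩ | ⟨F, hg1, hg2, hg3, hg4, hg5, _⟩
          · exact hg1
          · exfalso
            have hbF := (pvChk_iff text F (by omega)).mp hg4
            exact hr2 F (by omega) (by omega) hbF
        rw [hsA, hr1]
        rw [if_neg (by rintro ⟨h1, h2⟩; omega : ¬ (Lv = -1 ∧ (-1 : Int) = -1))]
        rw [if_neg (by omega : ¬ (Lv = -1)), if_pos rfl, if_pos (by omega : Lv ≠ -1)]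
      · -- both candidates exist
        have hRtp : tp ≤ Rv := by omega
        have htphi : tp ≤ hi - 1 := by omega
        have hMtp : M = tp := by omega
        have hmidtp : mid = tp + 1 := by omega
        by_cases hRe : Rv = tp
        · -- the break sits exactly at the target: Lv = tp as well, tie
          have hLe : Lv = tp := by
            by_contra hne
            exact hl5 tp (by omega) (by omega) (hRe ▸ hr3)
          have hsA : stA = (Lv, some (tp - Lv)) := by
            rcases hfr with ⟨hg1, _⟩ | ⟨F, hg1, hg2, hg3, hg4, hg5, _⟩
            · exact hg1
            · exfalso
              simp only at hg5
              omega
          rw [hsA]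
          rw [if_neg (by rintro ⟨h1, h2⟩; omega : ¬ (Lv = -1 ∧ Rv = -1))]
          rw [if_neg (by omega : ¬ (Lv = -1)), if_neg (by omega : ¬ (Rv = -1))]
          rw [if_pos (by omega : tp - Lv ≤ Rv - tp), if_pos (by omega : Lv ≠ -1)]
        · have hRgt : tp + 1 ≤ Rv := by omega
          rcases Int.lt_or_le (Rv - tp) (tp - Lv) with hcmp | hcmp
          · -- right candidate strictly closer: A ends at Rv
            have hsA : stA = (Rv, some (Rv - tp)) := by
              rcases hfr with ⟨hg1, hg2⟩ | ⟨F, hg1, hg2, hg3, hg4, hg5, hg6⟩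
              · exfalso
                refine hg2 Rv (by omega) (by omega) ((pvChk_iff text Rv (by omega)).mpr hr3) ?_
                simp only
                omega
              · have hFR : F = Rv := by
                  by_contra hne
                  rcases Int.lt_or_le F Rv with hlt | hge
                  · exact hr4 F (by omega) hlt ((pvChk_iff text F (by omega)).mp hg4)
                  · exact hg6 Rv (by omega) (by omega) ((pvChk_iff text Rv (by omega)).mpr hr3)
                rw [hFR] at hg1
                exact hg1
            rw [hsA]
            rw [if_neg (by rintro ⟨h1, h2⟩; omega : ¬ (Lv = -1 ∧ Rv = -1))]
            rw [if_neg (by omega : ¬ (Lv = -1)), if_neg (by omega : ¬ (Rv = -1))]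
            rw [if_neg (by omega : ¬ (tp - Lv ≤ Rv - tp)), if_pos (by omega : Rv ≠ -1)]
          · -- left candidate at least as close: tie favours it, A keeps Lv
            have hsA : stA = (Lv, some (tp - Lv)) := by
              rcases hfr with ⟨hg1, _⟩ | ⟨F, hg1, hg2, hg3, hg4, hg5, hg6⟩
              · exact hg1
              · exfalso
                simp only at hg5
                have hbF := (pvChk_iff text F (by omega)).mp hg4
                exact hr4 F (by omega) (by omega) hbF
            rw [hsA]
            rw [if_neg (by rintro ⟨h1, h2⟩; omega : ¬ (Lv = -1 ∧ Rv = -1))]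
            rw [if_neg (by omega : ¬ (Lv = -1)), if_neg (by omega : ¬ (Rv = -1))]
            rw [if_pos (by omega : tp - Lv ≤ Rv - tp), if_pos (by omega : Lv ≠ -1)]
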